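-- pv_equiv track=rewrite | github.com/takapdayon/atcoder | abc/AtCoderBeginnerContest195/C.py | c195
-- ===== SOURCE A (Python) =====
-- def c195(n):
--     if int(n) <= 999:
--         return 0
--
--     ans = 0
--     count = len(n) // 3 if len(n)%3 != 0 else len(n) // 3 - 1
--     revn = n[::-1]
--
--
--     for i, mn in enumerate(revn):
--         ans += ((10 **(i))*int(mn)) * count
--         if (i+1) == len(n):
--             ans -= int('100'*count)*10
--     ans += count
--
--     return ans
-- ===== SOURCE B (Python) =====
-- def c195(n):
--     if int(n) <= 999:
--         return 0
--     count = len(n) // 3 - (1 if len(n) % 3 == 0 else 0)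
--     v = 0
--     for ch in n:
--         v = v * 10 + int(ch)
--     return count * v - 10 * int('100' * count) + count
-- ===== Notes on version B (the rewrite author's own statement) =====
-- stated objective: simpler
-- what changed: Replaces the enumerate-over-reversed-string loop with per-position powers 10**i and an in-loop boundary subtraction by a plain forward Horner accumulation of the digit value, combined once at the end in closed form (count*v minus ten times the repeated-hundreds constant, plus count).
import Mathlib
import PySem

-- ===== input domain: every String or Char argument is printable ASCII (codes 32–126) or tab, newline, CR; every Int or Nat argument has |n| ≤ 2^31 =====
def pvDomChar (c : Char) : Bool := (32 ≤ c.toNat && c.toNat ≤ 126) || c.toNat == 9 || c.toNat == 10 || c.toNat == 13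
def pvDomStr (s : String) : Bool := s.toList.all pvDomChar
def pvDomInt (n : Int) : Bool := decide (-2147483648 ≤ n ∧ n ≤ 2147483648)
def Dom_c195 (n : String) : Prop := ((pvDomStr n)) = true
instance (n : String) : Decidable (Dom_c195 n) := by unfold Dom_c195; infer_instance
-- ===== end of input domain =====

-- B replaces A's enumerate-over-reversed loop (powers 10**i plus an in-loop boundary
-- subtraction) by a forward Horner digit accumulation combined once in closed form (objective: simpler).

-- int(c) for a single character; total via getD 0, only reached on digit characters inside Pre_
def pvIntChar (c : Char) : Int := (PySem.Int.ofStr? (String.ofList [c])).getD 0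

-- int('100' * count); total via getD 0 ('100'*count is nonempty digits whenever reached inside Pre_)
def pvHundreds (count : Int) : Int :=
  (PySem.Int.ofStr? (String.ofList (PySem.List.pyRepeat ['1', '0', '0'] count))).getD 0

-- ===== PORT A =====
def c195 (n : String) : Int :=
  match PySem.Int.ofStr? n with
  | none => 0    -- int(n) raises ValueError: excluded by Pre_c195
  | some v =>
    if v ≤ 999 then 0
    else
      let len : Int := PySem.Str.len n
      let count : Int :=
        if PySem.Int.mod len 3 ≠ 0 then PySem.Int.floordiv len 3
        else PySem.Int.floordiv len 3 - 1
      let revn : List Char := ((PySem.Str.slice? n none none (-1)).getD "").toList  -- n[::-1]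
      let ans : Int :=
        (PySem.List.enumerate revn).foldl
          (fun ans p =>
            -- 10**(i) with i ≥ 0 from enumerate: exact as 10 ^ i.toNat
            let ans := ans + 10 ^ p.1.toNat * pvIntChar p.2 * count
            if p.1 + 1 = len then ans - pvHundreds count * 10 else ans)
          0
      ans + count

-- ===== PORT B =====
def c195_alt (n : String) : Int :=
  match PySem.Int.ofStr? n with
  | none => 0    -- int(n) raises ValueError: excluded by Pre_c195
  | some v =>
    if v ≤ 999 then 0
    else
      let len : Int := PySem.Str.len n
      let count : Int :=
        PySem.Int.floordiv len 3 - (if PySem.Int.mod len 3 = 0 then 1 else 0)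
      let v2 : Int := n.toList.foldl (fun a c => a * 10 + pvIntChar c) 0
      count * v2 - 10 * pvHundreds count + count

-- ===== PRECONDITION & SPEC =====
-- Pre_ excludes exactly the inputs on which the Python A raises ValueError: strings int()
-- cannot parse, and strings with int(n) > 999 containing a non-digit character (the per-character
-- int() in the loop raises there); Python B raises on exactly the same inputs.
def Pre_c195 (n : String) : Prop :=
  (PySem.Int.ofStr? n).isSome = true ∧
    ((PySem.Int.ofStr? n).getD 0 ≤ 999 ∨ PySem.Str.strIsdigit n = true)
instance (n : String) : Decidable (Pre_c195 n) := by unfold Pre_c195; infer_instance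

def pvWitness_c195 : String := "1234"

def Spec_c195 (n : String) (out : Int) : Prop := out = c195_alt n
instance (n : String) (out : Int) : Decidable (Spec_c195 n out) := by unfold Spec_c195; infer_instance

-- ===== CLAIM (what is proved, stated in full; the proofs are below) =====
def Claim_equal_c195 : Prop := ∀ (n : String), Dom_c195 n → Pre_c195 n → Spec_c195 n (c195 n)

-- ===== LEMMAS AND PROOFS =====

-- Σ_{i < |ds|} 10^i * int(ds[i]) as a structural fold (the value A's loop accumulates over revn)
def pvSumPow : List Char → Int
  | [] => 0
  | c :: cs => pvIntChar c + 10 * pvSumPow cs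

theorem pvSumPow_append_singleton (cs : List Char) (c : Char) :
    pvSumPow (cs ++ [c]) = pvSumPow cs + 10 ^ cs.length * pvIntChar c := by
  induction cs with
  | nil => simp [pvSumPow]
  | cons d tl ih => simp [pvSumPow, ih]; ring

-- B's Horner loop computes the positional sum of the reversed digit list
theorem pvHorner_eq (cs : List Char) (a : Int) :
    cs.foldl (fun v c => v * 10 + pvIntChar c) a = a * 10 ^ cs.length + pvSumPow cs.reverse := by
  induction cs generalizing a with
  | nil => simp [pvSumPow]
  | cons c tl ih =>
    simp only [List.foldl_cons, ih, List.reverse_cons, pvSumPow_append_singleton,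
      List.length_reverse, List.length_cons]
    ring

-- A's loop over enumerate ds s, with arbitrary start s, accumulator and boundary L
theorem pvLoopA (L k H : Int) (ds : List Char) (s : Nat) (acc : Int) :
    (PySem.List.enumerate ds (s : Int)).foldl
        (fun ans p =>
          if p.1 + 1 = L then ans + 10 ^ p.1.toNat * pvIntChar p.2 * k - H * 10
          else ans + 10 ^ p.1.toNat * pvIntChar p.2 * k)
        acc
      = acc + k * 10 ^ s * pvSumPow ds -
          (if (s : Int) + 1 ≤ L ∧ L ≤ (s : Int) + ds.length then H * 10 else 0) := by
  induction ds generalizing s acc with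
  | nil =>
    simp only [List.length_nil, Nat.cast_zero, add_zero]
    rw [if_neg (by omega)]
    simp [PySem.List.enumerate, pvSumPow]
  | cons d tl ih =>
    rw [PySem.List.enumerate_cons]
    have hcast : ((s : Int) + 1) = ((s + 1 : Nat) : Int) := by push_cast; ring
    simp only [List.foldl_cons, hcast, ih]
    simp only [Int.toNat_natCast, pvSumPow, List.length_cons]
    by_cases hL : (((s + 1 : Nat)) : Int) = L
    · rw [if_pos hL, if_neg (by omega), if_pos (by omega)]
      ring
    · rw [if_neg hL]
      by_cases hc : (((s + 1 : Nat)) : Int) + 1 ≤ L ∧ L ≤ (((s + 1 : Nat)) : Int) + (tl.length : Int)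
      · rw [if_pos hc, if_pos (by omega)]
        ring
      · rw [if_neg hc, if_neg (by omega)]
        ring

-- pvLoopA at start 0 (the form the ports produce)
theorem pvLoopA0 (L k H : Int) (ds : List Char) :
    (PySem.List.enumerate ds).foldl
        (fun ans p =>
          if p.1 + 1 = L then ans + 10 ^ p.1.toNat * pvIntChar p.2 * k - H * 10
          else ans + 10 ^ p.1.toNat * pvIntChar p.2 * k)
        0
      = k * pvSumPow ds - (if 1 ≤ L ∧ L ≤ (ds.length : Int) then H * 10 else 0) := by
  have h := pvLoopA L k H ds 0 0
  simpa using h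

theorem pvCount_eq (len : Int) :
    (if PySem.Int.mod len 3 ≠ 0 then PySem.Int.floordiv len 3
      else PySem.Int.floordiv len 3 - 1)
      = PySem.Int.floordiv len 3 - (if PySem.Int.mod len 3 = 0 then 1 else 0) := by
  by_cases h : PySem.Int.mod len 3 = 0
  · rw [if_neg (not_not_intro h), if_pos h]
  · rw [if_pos h, if_neg h]
    ring

theorem pvOfStr?_nil : PySem.Int.ofStr? (String.ofList []) = none := by decide

-- ===== VERDICT (by name: the statement is the Claim_ definition above) =====
theorem c195_spec : Claim_equal_c195 := by
  intro n _ hpre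
  obtain ⟨hsome, -⟩ := hpre
  unfold Spec_c195 c195 c195_alt
  cases hv : PySem.Int.ofStr? n with
  | none => rfl
  | some v =>
    by_cases hle : v ≤ 999
    · simp [hle]
    · simp only [hle, if_false]
      have hne : n.toList ≠ [] := by
        intro h0
        have hn : n = String.ofList [] := by
          have := (String.ofList_toList (s := n))
          rw [h0] at this
          exact this.symm
        rw [hn, pvOfStr?_nil] at hv
        simp at hv
      rw [PySem.Str.slice?_none_none_neg_one]
      simp only [Option.getD_some, String.toList_ofList, PySem.Str.len_eq]
      rw [pvCount_eq]
      rw [pvLoopA0, pvHorner_eq n.toList 0]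
      have hlen : 0 < n.toList.length := List.length_pos_iff.mpr hne
      simp only [List.length_reverse]
      rw [if_pos (And.intro (by omega) (by omega))]
      split_ifs <;> ring
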